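-- pv_equiv track=rewrite | github.com/Lucas-Guimaraes/Reddit-Daily-Programmer | Easy Problems/331-340/336easy.py | cannibal
-- ===== SOURCE A (Python) =====
-- def cannibal(lst, target):
--     temp_lst = []
--     #Compares all numbers in list
--     for i in range(len(lst)):
--         temp = lst[i]
--         for x in range(len(lst)):
--             if lst[i] > lst[x]:
--                 temp += 1
--         temp_lst.append(temp)
--
--     #Compares every item in lst to target
--     count = 0
--     for i in temp_lst:
--         if i >= target:
--             count += 1
--
--     return count
-- ===== SOURCE B (Python) =====
-- def cannibal(lst, target):
--     # Sort once; in the sorted order, the number of elements strictly smaller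
--     # than v is the index where v's run of equal values starts.
--     count = 0
--     first = 0
--     prev = None
--     for i, v in enumerate(sorted(lst)):
--         if prev is not None and v != prev:
--             first = i
--         if v + first >= target:
--             count += 1
--         prev = v
--     return count
-- ===== Notes on version B (the rewrite author's own statement) =====
-- stated objective: faster
-- what changed: Replaced the quadratic all-pairs comparison (for each element, scan the whole list to count smaller elements) by one sort followed by a single linear scan that reads off the strictly-smaller count as the start index of each run of equal values in the sorted list.
import Mathlib
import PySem

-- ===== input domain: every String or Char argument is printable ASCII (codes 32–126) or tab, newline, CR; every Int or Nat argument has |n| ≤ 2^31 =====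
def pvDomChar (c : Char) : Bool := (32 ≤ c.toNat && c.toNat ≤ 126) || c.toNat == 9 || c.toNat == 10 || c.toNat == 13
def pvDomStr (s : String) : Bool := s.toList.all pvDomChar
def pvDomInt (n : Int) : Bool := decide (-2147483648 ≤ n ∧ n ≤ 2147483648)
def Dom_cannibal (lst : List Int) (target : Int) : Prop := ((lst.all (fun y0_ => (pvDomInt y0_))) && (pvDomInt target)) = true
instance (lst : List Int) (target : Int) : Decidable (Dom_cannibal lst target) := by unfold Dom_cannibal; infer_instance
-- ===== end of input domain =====

-- B sorts once and reads each element's strictly-smaller count off its run-start index in one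
-- linear scan (O(n log n)) instead of A's all-pairs comparison (O(n^2)); same return value everywhere.

-- ===== PORT A =====
def cannibal (lst : List Int) (target : Int) : Int :=
  -- for i in range(len(lst)): temp = lst[i]; for x …: if lst[i] > lst[x]: temp += 1; temp_lst.append(temp)
  let temp_lst : List Int :=
    (PySem.List.pyRange 0 (PySem.List.len lst)).foldl
      (fun temp_lst i =>
        let vi := PySem.List.pyGetD lst i 0   -- lst[i]; index always in range
        let temp :=
          (PySem.List.pyRange 0 (PySem.List.len lst)).foldl
            (fun temp x =>
              if PySem.List.pyGetD lst x 0 < vi then temp + 1 else temp) vi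
        temp_lst ++ [temp]) []
  -- count = 0; for i in temp_lst: if i >= target: count += 1
  let count : Int :=
    temp_lst.foldl (fun count i => if target ≤ i then count + 1 else count) 0
  count

-- ===== PORT B =====
def cannibal_alt (lst : List Int) (target : Int) : Int :=
  -- count = 0; first = 0; prev = None; for i, v in enumerate(sorted(lst)): …
  let st : Int × Int × Option Int :=
    (PySem.List.enumerate (PySem.List.sorted lst (fun x => x))).foldl
      (fun (st : Int × Int × Option Int) p =>
        let count := st.1
        let first := st.2.1
        let prev := st.2.2
        let i := p.1
        let v := p.2
        let first := match prev with
          | some pv => if v ≠ pv then i else first   -- if prev is not None and v != prev: first = i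
          | none => first
        let count := if target ≤ v + first then count + 1 else count
        (count, first, some v)) (0, 0, none)
  st.1

-- ===== PRECONDITION & SPEC =====
def Spec_cannibal (lst : List Int) (target : Int) (out : Int) : Prop := out = cannibal_alt lst target
instance (lst : List Int) (target : Int) (out : Int) : Decidable (Spec_cannibal lst target out) := by unfold Spec_cannibal; infer_instance

-- ===== CLAIM (what is proved, stated in full; the proofs are below) =====
def Claim_equal_cannibal : Prop := ∀ (lst : List Int) (target : Int), Dom_cannibal lst target → Spec_cannibal lst target (cannibal lst target)

-- ===== LEMMAS AND PROOFS =====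

-- number of elements of l strictly below v
def smaller (l : List Int) (v : Int) : Int := (l.countP (fun x => decide (x < v)) : Int)

-- A computes, for each v in lst, v + (# strictly smaller), then counts those ≥ target.
theorem inner_eq (lst : List Int) (v : Int) :
    (PySem.List.pyRange 0 (PySem.List.len lst)).foldl
      (fun temp x => if PySem.List.pyGetD lst x 0 < v then temp + 1 else temp) v
    = v + smaller lst v := by
  rw [PySem.List.foldl_pyRange_zero_pyGetD lst 0 (fun temp x => if x < v then temp + 1 else temp) v]
  simpa [smaller] using PySem.List.foldl_count_if (fun x => decide (x < v)) lst v

theorem cannibal_eq_countP (lst : List Int) (target : Int) :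
    cannibal lst target
      = (lst.countP (fun v => decide (target ≤ v + smaller lst v)) : Int) := by
  show ((PySem.List.pyRange 0 (PySem.List.len lst)).foldl
      (fun temp_lst i =>
        temp_lst ++ [(PySem.List.pyRange 0 (PySem.List.len lst)).foldl
            (fun temp x =>
              if PySem.List.pyGetD lst x 0 < PySem.List.pyGetD lst i 0 then temp + 1 else temp)
            (PySem.List.pyGetD lst i 0)]) []).foldl
      (fun count i => if target ≤ i then count + 1 else count) 0 = _
  rw [PySem.List.foldl_pyRange_zero_pyGetD lst 0
        (fun temp_lst vi => temp_lst ++ [(PySem.List.pyRange 0 (PySem.List.len lst)).foldl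
            (fun temp x => if PySem.List.pyGetD lst x 0 < vi then temp + 1 else temp) vi]) [],
      PySem.List.foldl_append_singleton_eq_map]
  have h1 : (lst.map (fun vi => (PySem.List.pyRange 0 (PySem.List.len lst)).foldl
            (fun temp x => if PySem.List.pyGetD lst x 0 < vi then temp + 1 else temp) vi))
      = lst.map (fun v => v + smaller lst v) :=
    List.map_congr_left (fun v _ => inner_eq lst v)
  rw [List.nil_append, h1]
  simpa [List.countP_map, Function.comp] using
    PySem.List.foldl_count_if (fun i => decide (target ≤ i)) (lst.map (fun v => v + smaller lst v)) 0

theorem le_getLast_of_sorted (t : List Int) (ht : t.Pairwise (· ≤ ·)) :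
    ∀ b, t.getLast? = some b → ∀ x ∈ t, x ≤ b := by
  induction t with
  | nil => simp
  | cons y t ih =>
    intro b hb x hx
    have hbmem : b ∈ y :: t := List.mem_of_getLast? hb
    rcases List.mem_cons.mp hx with rfl | hx'
    · rcases List.mem_cons.mp hbmem with rfl | hb'
      · exact le_refl _
      · exact List.rel_of_pairwise_cons ht hb'
    · rcases t with _ | ⟨z, t'⟩
      · simp at hx'
      · rw [List.getLast?_cons_cons] at hb
        exact ih ht.tail b hb x hx'

-- the scan invariant for B's single pass over the sorted list
theorem scan_invariant (target : Int) (s : List Int) (hs : s.Pairwise (· ≤ ·)) :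
    (PySem.List.enumerate s).foldl
      (fun (st : Int × Int × Option Int) p =>
        let count := st.1
        let first := st.2.1
        let prev := st.2.2
        let i := p.1
        let v := p.2
        let first := match prev with
          | some pv => if v ≠ pv then i else first
          | none => first
        let count := if target ≤ v + first then count + 1 else count
        (count, first, some v)) (0, 0, none)
    = ((s.countP (fun v => decide (target ≤ v + smaller s v)) : Int),
       (match s.getLast? with | none => 0 | some a => smaller s a),
       s.getLast?) := by
  induction s using List.reverseRecOn with
  | nil => simp [PySem.List.enumerate]
  | append_singleton t a ih =>
    have hp := List.pairwise_append.mp hs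
    have ht : t.Pairwise (· ≤ ·) := hp.1
    have hta : ∀ x ∈ t, x ≤ a := fun x hx => hp.2.2 x hx a (by simp)
    have hsm_t : ∀ v ∈ t, smaller (t ++ [a]) v = smaller t v := by
      intro v hv
      unfold smaller
      rw [List.countP_append]
      have : ¬ (a < v) := not_lt.mpr (hta v hv)
      simp [this]
    have hsm_a : smaller (t ++ [a]) a = smaller t a := by
      unfold smaller
      rw [List.countP_append]; simp
    have hcount : (t ++ [a]).countP (fun v => decide (target ≤ v + smaller (t ++ [a]) v))
        = t.countP (fun v => decide (target ≤ v + smaller t v))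
          + (if target ≤ a + smaller (t ++ [a]) a then 1 else 0) := by
      rw [List.countP_append,
          List.countP_congr (fun v hv => by rw [hsm_t v hv])]
      simp [List.countP_cons]
    rw [PySem.List.enumerate_append, List.foldl_append, ih ht]
    simp only [PySem.List.enumerate_cons, PySem.List.enumerate_nil, List.foldl_cons, List.foldl_nil]
    rcases hl : t.getLast? with _ | b
    · -- t = []
      have : t = [] := List.getLast?_eq_none_iff.mp hl
      subst this
      simp [smaller, List.countP_cons]
    · -- t ≠ [], last b
      have hba : b ≤ a := hta b (List.mem_of_getLast? hl)
      have hlast : (t ++ [a]).getLast? = some a := by simp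
      rw [hcount, hlast]
      by_cases hab : a = b
      · subst hab
        have h1 : smaller (t ++ [a]) a = smaller t a := hsm_a
        simp [h1]
        split_ifs <;> omega
      · have hlen : smaller (t ++ [a]) a = (t.length : Int) := by
          unfold smaller
          rw [List.countP_append]
          have : ∀ x ∈ t, x < a := by
            intro x hx
            exact lt_of_le_of_lt (le_getLast_of_sorted t ht b hl x hx) (lt_of_le_of_ne hba (Ne.symm hab))
          have := List.countP_eq_length.mpr (fun x hx => decide_eq_true (this x hx))
          simp [this]
        simp [hab, hlen]
        split_ifs <;> omega

theorem cannibal_alt_eq_countP (lst : List Int) (target : Int) :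
    cannibal_alt lst target
      = ((PySem.List.sorted lst (fun x => x)).countP
          (fun v => decide (target ≤ v + smaller (PySem.List.sorted lst (fun x => x)) v)) : Int) := by
  show ((PySem.List.enumerate (PySem.List.sorted lst (fun x => x))).foldl _ (0, 0, none)).1 = _
  rw [scan_invariant target _ (PySem.List.sorted_pairwise lst (fun x => x))]

-- ===== VERDICT (by name: the statement is the Claim_ definition above) =====
theorem cannibal_spec : Claim_equal_cannibal := by
  intro lst target _
  unfold Spec_cannibal
  rw [cannibal_eq_countP, cannibal_alt_eq_countP]
  have hperm := PySem.List.sorted_perm lst (fun x => x) false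
  have hsm : ∀ v, smaller (PySem.List.sorted lst (fun x => x)) v = smaller lst v := by
    intro v; unfold smaller; rw [hperm.countP_eq]
  have h1 : (PySem.List.sorted lst (fun x => x)).countP
        (fun v => decide (target ≤ v + smaller (PySem.List.sorted lst (fun x => x)) v))
      = (PySem.List.sorted lst (fun x => x)).countP
        (fun v => decide (target ≤ v + smaller lst v)) :=
    List.countP_congr (fun v _ => by rw [hsm v])
  rw [h1, hperm.countP_eq]
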